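-- pv_equiv track=rewrite | github.com/p88h/aoc2021 | other/xrot.py | rot
-- ===== SOURCE A (Python) =====
-- def rot(v3, d):
--     (d1, d2) = ((d+1)%3, (d+2)%3)
--     tmp = list(v3)
--     ret = []
--     for _ in range(4):
--         (tmp[d1], tmp[d2]) = (tmp[d2], -tmp[d1])
--         ret.append(tuple(tmp))
--     return ret
-- ===== SOURCE B (Python) =====
-- def rot(v3, d):
--     d0 = d % 3
--     a, b, c = v3[(d0 + 1) % 3], v3[(d0 + 2) % 3], v3[d0]
--     pairs = [(b, -a), (-a, -b), (-b, a), (a, b)]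
--     if d0 == 0:
--         return [(c, p, q) for (p, q) in pairs]
--     if d0 == 1:
--         return [(q, c, p) for (p, q) in pairs]
--     return [(p, q, c) for (p, q) in pairs]
-- ===== Notes on version B (the rewrite author's own statement) =====
-- stated objective: simpler
-- what changed: Replaces the 4-step loop that mutates a running list in place with a closed-form sign pattern (b,-a),(-a,-b),(-b,a),(a,b) read from the two rotating coordinates once and placed into fresh tuples around the fixed axis coordinate.
import Mathlib
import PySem

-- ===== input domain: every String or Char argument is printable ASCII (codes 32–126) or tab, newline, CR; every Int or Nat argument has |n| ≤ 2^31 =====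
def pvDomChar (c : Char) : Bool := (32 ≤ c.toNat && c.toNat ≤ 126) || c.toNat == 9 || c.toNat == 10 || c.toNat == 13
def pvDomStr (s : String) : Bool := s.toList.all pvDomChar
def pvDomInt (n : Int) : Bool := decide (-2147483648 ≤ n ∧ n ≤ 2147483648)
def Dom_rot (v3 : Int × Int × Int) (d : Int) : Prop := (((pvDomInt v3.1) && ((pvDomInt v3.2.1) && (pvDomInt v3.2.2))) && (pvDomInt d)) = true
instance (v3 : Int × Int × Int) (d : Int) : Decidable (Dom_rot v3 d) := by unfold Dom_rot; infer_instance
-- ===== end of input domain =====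

-- B replaces A's 4-step in-place mutation loop with a closed-form sign pattern placed into fresh tuples (objective: simpler).
-- ===== PORT A =====
-- Helper: Python's tuple(tmp) on the running 3-element list (tmp always has length 3).
def pvTuple3 (l : List Int) : Int × Int × Int :=
  match l with
  | [x, y, z] => (x, y, z)
  | _ => (0, 0, 0)

-- Literal port of A: d1,d2 = ((d+1)%3,(d+2)%3); tmp = list(v3); 4-step loop doing
-- (tmp[d1], tmp[d2]) = (tmp[d2], -tmp[d1]) and appending tuple(tmp).
-- d1, d2 ∈ {0,1,2} by construction, so the .toNat on the write indices and the
-- .getD 0 on the reads are exact (Python never raises here).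
def rot (v3 : Int × Int × Int) (d : Int) : List (Int × Int × Int) :=
  let d1 := PySem.Int.mod (d + 1) 3
  let d2 := PySem.Int.mod (d + 2) 3
  let tmp0 : List Int := [v3.1, v3.2.1, v3.2.2]
  let st := (PySem.List.pyRange 0 4 1).foldl
    (fun (st : List Int × List (Int × Int × Int)) _ =>
      let tmp := st.1
      let a := (PySem.List.pyGet? tmp d1).getD 0
      let b := (PySem.List.pyGet? tmp d2).getD 0
      let tmp' := (tmp.set d1.toNat b).set d2.toNat (-a)
      (tmp', st.2 ++ [pvTuple3 tmp']))
    (tmp0, [])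
  st.2

-- ===== PORT B =====
-- Helper: v3[i] for i ∈ {0,1,2}.
def pvIdx3 (v : Int × Int × Int) (i : Int) : Int :=
  if i = 0 then v.1 else if i = 1 then v.2.1 else v.2.2

-- Port of B: closed-form sign pattern placed around the fixed axis coordinate.
def rot_alt (v3 : Int × Int × Int) (d : Int) : List (Int × Int × Int) :=
  let d0 := PySem.Int.mod d 3
  let a := pvIdx3 v3 (PySem.Int.mod (d0 + 1) 3)
  let b := pvIdx3 v3 (PySem.Int.mod (d0 + 2) 3)
  let c := pvIdx3 v3 d0
  let pairs : List (Int × Int) := [(b, -a), (-a, -b), (-b, a), (a, b)]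
  if d0 = 0 then pairs.map (fun pq => (c, pq.1, pq.2))
  else if d0 = 1 then pairs.map (fun pq => (pq.2, c, pq.1))
  else pairs.map (fun pq => (pq.1, pq.2, c))

-- ===== PRECONDITION & SPEC =====
def Spec_rot (v3 : Int × Int × Int) (d : Int) (out : List (Int × Int × Int)) : Prop := out = rot_alt v3 d
instance (v3 : Int × Int × Int) (d : Int) (out : List (Int × Int × Int)) : Decidable (Spec_rot v3 d out) := by unfold Spec_rot; infer_instance

-- ===== CLAIM (what is proved, stated in full; the proofs are below) =====
def Claim_equal_rot : Prop := ∀ (v3 : Int × Int × Int) (d : Int), Dom_rot v3 d → Spec_rot v3 d (rot v3 d)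

-- ===== LEMMAS AND PROOFS =====
-- ===== VERDICT (by name: the statement is the Claim_ definition above) =====
theorem rot_spec : Claim_equal_rot := by
  intro v3 d _
  obtain ⟨x, y, z⟩ := v3
  show rot (x, y, z) d = rot_alt (x, y, z) d
  have hr : d % 3 = 0 ∨ d % 3 = 1 ∨ d % 3 = 2 := by omega
  have e0 : PySem.Int.mod d 3 = d % 3 := PySem.Int.mod_eq_emod_of_pos (by norm_num)
  have e1 : PySem.Int.mod (d + 1) 3 = (d + 1) % 3 := PySem.Int.mod_eq_emod_of_pos (by norm_num)
  have e2 : PySem.Int.mod (d + 2) 3 = (d + 2) % 3 := PySem.Int.mod_eq_emod_of_pos (by norm_num)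
  rcases hr with h | h | h
  · have h1 : (d + 1) % 3 = 1 := by omega
    have h2 : (d + 2) % 3 = 2 := by omega
    simp [rot, rot_alt, e0, e1, e2, h, h1, h2, pvTuple3, pvIdx3,
      PySem.List.pyRange, PySem.List.pyGet?, PySem.List.pyIdx?, List.range_succ]
  · have h1 : (d + 1) % 3 = 2 := by omega
    have h2 : (d + 2) % 3 = 0 := by omega
    simp [rot, rot_alt, e0, e1, e2, h, h1, h2, pvTuple3, pvIdx3,
      PySem.List.pyRange, PySem.List.pyGet?, PySem.List.pyIdx?, List.range_succ]
  · have h1 : (d + 1) % 3 = 0 := by omega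
    have h2 : (d + 2) % 3 = 1 := by omega
    simp [rot, rot_alt, e0, e1, e2, h, h1, h2, pvTuple3, pvIdx3,
      PySem.List.pyRange, PySem.List.pyGet?, PySem.List.pyIdx?, List.range_succ]
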